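-- pv_equiv track=rewrite | github.com/Swallowedin/corruption_actions_identifier | app.py | parse_best_practices_and_kpis
-- ===== SOURCE A (Python) =====
-- def parse_best_practices_and_kpis(text):
--     """Parse les bonnes pratiques et KPIs générés"""
--     practices = {}
--     current_bp = None
--
--     for line in text.split('\n'):
--         line = line.strip()
--         if line.startswith('BP'):
--             current_bp = line.split(':', 1)[1].strip()
--             practices[current_bp] = []
--         elif line.startswith('-') and current_bp:
--             kpi = line[1:].strip()
--             practices[current_bp].append(kpi)
--
--     return practices
-- ===== SOURCE B (Python) =====
-- def parse_best_practices_and_kpis(text):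
--     """Parse les bonnes pratiques et KPIs generes (partition-then-map)."""
--     lines = [l.strip() for l in text.split('\n')]
--     # Phase 1: partition into (header, body-lines) groups; lines before the
--     # first 'BP' header belong to no group and are dropped.
--     groups = []
--     i = 0
--     n = len(lines)
--     while i < n:
--         if lines[i].startswith('BP'):
--             j = i + 1
--             while j < n and not lines[j].startswith('BP'):
--                 j += 1
--             groups.append((lines[i], lines[i + 1:j]))
--             i = j
--         else:
--             i += 1
--     # Phase 2: map each group to its practice name and KPI list.
--     result = {}
--     for header, body in groups:
--         name = header.split(':', 1)[1].strip()
--         result[name] = [l[1:].strip() for l in body if l.startswith('-')]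
--     return result
-- ===== Notes on version B (the rewrite author's own statement) =====
-- stated objective: alternative
-- what changed: B replaces A's single-pass loop with a running current_bp accumulator by an explicit two-phase decomposition: first partition the stripped lines into (header, body-lines) groups, dropping pre-header lines, then map each group to its parsed name and KPI list.
-- intended difference: On texts whose last empty-named 'BP…:' header (name empty after the colon) is followed by '-' lines in its own section, A returns [] for that practice because the empty name is falsy in 'and current_bp' and the KPI lines are silently dropped, while B returns those KPIs; B's value is the intended parse of the section. — e.g. on parse_best_practices_and_kpis("BP1:\n- x"): A returns [("", [])], B returns [("", ["x"])]
-- outside the precondition, e.g. on parse_best_practices_and_kpis('BP'): A raises IndexError, B raises IndexError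
import Mathlib
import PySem

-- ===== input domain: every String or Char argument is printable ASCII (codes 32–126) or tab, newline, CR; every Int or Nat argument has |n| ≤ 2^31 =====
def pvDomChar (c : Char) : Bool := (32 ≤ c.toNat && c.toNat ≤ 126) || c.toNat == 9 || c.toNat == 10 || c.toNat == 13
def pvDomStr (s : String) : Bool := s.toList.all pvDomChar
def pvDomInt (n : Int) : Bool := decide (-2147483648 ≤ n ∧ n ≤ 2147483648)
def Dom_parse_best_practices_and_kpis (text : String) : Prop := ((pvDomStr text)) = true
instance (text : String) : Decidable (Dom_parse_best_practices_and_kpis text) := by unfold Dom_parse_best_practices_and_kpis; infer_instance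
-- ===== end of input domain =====

-- B replaces A's running current_bp accumulator with an explicit partition-into-groups pass followed by a
-- map over the groups (objective: alternative decomposition, similar cost).

-- ===== PORT A =====

-- name = line.split(':', 1)[1].strip()   (used by both ports and by D_)
def pvBpName (h : String) : String :=
  PySem.Str.strip ((PySem.List.pyGet? ((PySem.Str.splitMax? h ":" 1).getD []) 1).getD "")

-- one iteration of A's loop; state = (practices dict, current_bp); the line arrives already stripped
def pvLineStepA (st : PySem.Dict String (List String) × Option String) (line : String) :
    PySem.Dict String (List String) × Option String :=
  if PySem.Str.startswith line "BP" then
    let name := pvBpName line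
    (st.1.insert name [], some name)
  else
    match st.2 with
    | some c =>
        -- Python: elif line.startswith('-') and current_bp:  (an empty current_bp is falsy)
        if PySem.Str.startswith line "-" && !(c == "") then
          (st.1.modify c [] (· ++ [PySem.Str.strip (PySem.Str.slice line (some 1) none)]), some c)
        else st
    | none => st

def pvStepA (st : PySem.Dict String (List String) × Option String) (raw : String) :
    PySem.Dict String (List String) × Option String :=
  pvLineStepA st (PySem.Str.strip raw)

def parse_best_practices_and_kpis (text : String) : List (String × List String) :=
  ((((PySem.Str.split? text "\n").getD []).foldl pvStepA (PySem.Dict.empty, none)).1).items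

-- ===== PORT B =====

def pvIsH (l : String) : Bool := PySem.Str.startswith l "BP"

-- [l[1:].strip() for l in body if l.startswith('-')]
def pvKpis (body : List String) : List String :=
  (body.filter (fun l => PySem.Str.startswith l "-")).map
    (fun l => PySem.Str.strip (PySem.Str.slice l (some 1) none))

-- phase 1 of B: the scan with i/j; inner while = scan of the longest non-header run
def pvGroups : List String → List (String × List String)
  | [] => []
  | l :: rest =>
      if pvIsH l then
        (l, rest.takeWhile (fun x => !pvIsH x)) :: pvGroups (rest.dropWhile (fun x => !pvIsH x))
      else pvGroups rest
  termination_by ls => ls.length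
  decreasing_by
    · exact Nat.lt_succ_of_le (List.length_dropWhile_le _ _)
    · exact Nat.lt_succ_of_le (Nat.le_refl _)

def parse_best_practices_and_kpis_alt (text : String) : List (String × List String) :=
  let lines := ((PySem.Str.split? text "\n").getD []).map PySem.Str.strip
  ((pvGroups lines).foldl
      (fun d g => d.insert (pvBpName g.1) (pvKpis g.2)) PySem.Dict.empty).items

-- ===== PRECONDITION & SPEC =====

-- Pre_ excludes texts in which some stripped line starts with 'BP' but contains no ':' — there A raises
-- IndexError on split(':', 1)[1].
def Pre_parse_best_practices_and_kpis (text : String) : Prop :=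
  ∀ l ∈ (PySem.Str.split? text "\n").getD [],
    PySem.Str.startswith (PySem.Str.strip l) "BP" = true →
      PySem.Str.isIn ":" (PySem.Str.strip l) = true

instance (text : String) : Decidable (Pre_parse_best_practices_and_kpis text) := by
  unfold Pre_parse_best_practices_and_kpis; infer_instance

def pvWitness_parse_best_practices_and_kpis : String :=
  "BP1: Name\n- kpi one\nignored\nBP2: Other\n- kpi two"

-- On texts whose LAST empty-named 'BP…:' header (name empty after the colon) is followed by '-' lines in its
-- own section, A returns [] for that practice (the empty name is falsy, so its KPI lines are silently dropped)
-- while B returns those KPIs; B's value is the intended parse of the section.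
-- some suffix of the stripped lines starts at the LAST empty-named 'BP' header (no later
-- empty-named header) and its own section (before the next "BP" line) holds a '-' line
def D_parse_best_practices_and_kpis (text : String) : Prop :=
  ∃ t ∈ (((PySem.Str.split? text "\n").getD []).map PySem.Str.strip).tails,
    (PySem.Str.startswith t.headI "BP" && pvBpName t.headI == "" &&
      t.tail.all (fun x => !(PySem.Str.startswith x "BP" && pvBpName x == "")) &&
      (t.tail.takeWhile (!PySem.Str.startswith · "BP")).any
        (PySem.Str.startswith · "-")) = true

instance (text : String) : Decidable (D_parse_best_practices_and_kpis text) := by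
  unfold D_parse_best_practices_and_kpis; infer_instance

def Spec_parse_best_practices_and_kpis (text : String) (out : List (String × List String)) : Prop :=
  ¬ D_parse_best_practices_and_kpis text → out = parse_best_practices_and_kpis_alt text

instance (text : String) (out : List (String × List String)) :
    Decidable (Spec_parse_best_practices_and_kpis text out) := by
  unfold Spec_parse_best_practices_and_kpis; infer_instance

def pvDiffWitness_parse_best_practices_and_kpis : String := "BP1:\n- x"

def pvDiffWitnessOut_parse_best_practices_and_kpis :
    (List (String × List String)) × (List (String × List String)) :=
  ([("", [])], [("", ["x"])])

-- ===== CLAIM (what is proved, stated in full; the proofs are below) =====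
def Claim_unchanged_parse_best_practices_and_kpis : Prop :=
  ∀ (text : String), Dom_parse_best_practices_and_kpis text →
    Pre_parse_best_practices_and_kpis text →
      Spec_parse_best_practices_and_kpis text (parse_best_practices_and_kpis text)

def Claim_changed_parse_best_practices_and_kpis : Prop :=
  Dom_parse_best_practices_and_kpis (pvDiffWitness_parse_best_practices_and_kpis) ∧
  Pre_parse_best_practices_and_kpis (pvDiffWitness_parse_best_practices_and_kpis) ∧
  D_parse_best_practices_and_kpis (pvDiffWitness_parse_best_practices_and_kpis) ∧
  parse_best_practices_and_kpis (pvDiffWitness_parse_best_practices_and_kpis) =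
    pvDiffWitnessOut_parse_best_practices_and_kpis.1 ∧
  parse_best_practices_and_kpis_alt (pvDiffWitness_parse_best_practices_and_kpis) =
    pvDiffWitnessOut_parse_best_practices_and_kpis.2 ∧
  pvDiffWitnessOut_parse_best_practices_and_kpis.1 ≠ pvDiffWitnessOut_parse_best_practices_and_kpis.2

def Claim_exact_parse_best_practices_and_kpis : Prop :=
  ∀ (text : String), Dom_parse_best_practices_and_kpis text →
    Pre_parse_best_practices_and_kpis text →
      D_parse_best_practices_and_kpis text →
        parse_best_practices_and_kpis text ≠ parse_best_practices_and_kpis_alt text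

-- ===== LEMMAS AND PROOFS =====

def pvIsEH (l : String) : Bool := pvIsH l && (pvBpName l == "")

-- pvTailBadP, re-stated through pvIsEH/pvIsH for the proofs
def pvTailBadP : List String → Bool
  | [] => false
  | e :: v =>
      pvIsEH e && v.all (fun x => !pvIsEH x) &&
        (v.takeWhile (fun x => !pvIsH x)).any (fun x => PySem.Str.startswith x "-")

-- D_ is the ∃-over-suffixes reading of the pvTailBadP scan
theorem pv_D_iff (text : String) :
    D_parse_best_practices_and_kpis text
      ↔ ((((PySem.Str.split? text "\n").getD []).map PySem.Str.strip).tails.any pvTailBadP)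
          = true := by
  unfold D_parse_best_practices_and_kpis
  rw [List.any_eq_true]
  apply exists_congr
  intro t
  apply and_congr_right
  intro _
  cases t with
  | nil =>
    constructor
    · intro h
      exact absurd h (by decide)
    · intro h
      exact absurd h (by decide)
  | cons e v =>
    have ht : (PySem.Str.startswith e "BP" && pvBpName e == "" &&
        v.all (fun x => !(PySem.Str.startswith x "BP" && pvBpName x == "")) &&
        (v.takeWhile (!PySem.Str.startswith · "BP")).any (PySem.Str.startswith · "-"))
          = pvTailBadP (e :: v) := by
      simp only [pvTailBadP, pvIsEH, pvIsH, Bool.and_assoc]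
    rw [List.headI_cons, List.tail_cons, ht]

-- A's insert step, as characterised (name × "A's kpis for that name": empty name collects nothing)
def pvKpisA (c : String) (body : List String) : List String :=
  if c = "" then [] else pvKpis body

def pvInsA (d : PySem.Dict String (List String)) (g : String × List String) :
    PySem.Dict String (List String) :=
  d.insert (pvBpName g.1) (pvKpisA (pvBpName g.1) g.2)

def pvInsB (d : PySem.Dict String (List String)) (g : String × List String) :
    PySem.Dict String (List String) :=
  d.insert (pvBpName g.1) (pvKpis g.2)

-- A's dash-handling on a single body line, with section name c
def pvDash (c : String) (d : PySem.Dict String (List String)) (l : String) :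
    PySem.Dict String (List String) :=
  if PySem.Str.startswith l "-" && !(c == "") then
    d.modify c [] (· ++ [PySem.Str.strip (PySem.Str.slice l (some 1) none)])
  else d

-- "the last empty-named group's kpi list is nonempty", computed over the group list
def pvGBad : List (String × List String) → Bool
  | [] => false
  | g :: gs =>
      if gs.any (fun h => pvBpName h.1 == "") then pvGBad gs
      else (pvBpName g.1 == "") && !(pvKpis g.2).isEmpty

-- A's loop step on a (stripped) header line
theorem pv_stepA_header (d : PySem.Dict String (List String)) (cur : Option String) (l : String)
    (h : pvIsH l = true) :
    pvLineStepA (d, cur) l = (d.insert (pvBpName l) [], some (pvBpName l)) := by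
  unfold pvIsH at h
  unfold pvLineStepA
  rw [if_pos h]

-- A's loop step on a (stripped) non-header line, section open
theorem pv_stepA_body (d : PySem.Dict String (List String)) (c l : String)
    (h : pvIsH l = false) :
    pvLineStepA (d, some c) l = (pvDash c d l, some c) := by
  unfold pvIsH at h
  have h1 : pvLineStepA (d, some c) l
      = (if (PySem.Str.startswith l "-" && !(c == "")) = true then
          (d.modify c [] (· ++ [PySem.Str.strip (PySem.Str.slice l (some 1) none)]), some c)
        else (d, some c)) := by
    unfold pvLineStepA
    rw [if_neg (by rw [h]; exact Bool.false_ne_true)]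
  rw [h1]
  unfold pvDash
  by_cases hd : (PySem.Str.startswith l "-" && !(c == "")) = true
  · rw [if_pos hd, if_pos hd]
  · rw [if_neg hd, if_neg hd]

-- A's loop step on a (stripped) non-header line, no section open
theorem pv_stepA_none (d : PySem.Dict String (List String)) (l : String)
    (h : pvIsH l = false) :
    pvLineStepA (d, none) l = (d, none) := by
  unfold pvIsH at h
  unfold pvLineStepA
  rw [if_neg (by rw [h]; exact Bool.false_ne_true)]

-- A consumes the non-header run after a header by pvDash steps
theorem pv_foldl_stepA_body (ls : List String) (d : PySem.Dict String (List String)) (c : String) :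
    ls.foldl pvLineStepA (d, some c)
      = (ls.dropWhile (fun x => !pvIsH x)).foldl pvLineStepA
          ((ls.takeWhile (fun x => !pvIsH x)).foldl (pvDash c) d, some c) := by
  induction ls generalizing d with
  | nil => simp
  | cons l rest ih =>
    by_cases hH : pvIsH l = true
    · simp [hH]
    · rw [Bool.not_eq_true] at hH
      simp only [List.takeWhile_cons, List.dropWhile_cons, hH, Bool.not_false, if_pos,
        List.foldl_cons, pv_stepA_body _ _ _ hH]
      exact ih (pvDash c d l)

-- modify after inserting the same key
theorem pv_modify_insert (d : PySem.Dict String (List String)) (k : String)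
    (v d0 : List String) (f : List String → List String) :
    (d.insert k v).modify k d0 f = d.insert k (f v) := by
  show (d.insert k v).insert k (f ((d.insert k v).getD k d0)) = _
  rw [PySem.Dict.getD_insert_self, PySem.Dict.insert_insert_self]

theorem pv_kpis_cons_pos (l : String) (b : List String)
    (h : PySem.Str.startswith l "-" = true) :
    pvKpis (l :: b) = PySem.Str.strip (PySem.Str.slice l (some 1) none) :: pvKpis b := by
  simp only [pvKpis, List.filter_cons, h, if_true, List.map_cons]

theorem pv_kpis_cons_neg (l : String) (b : List String)
    (h : PySem.Str.startswith l "-" = false) :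
    pvKpis (l :: b) = pvKpis b := by
  simp only [pvKpis, List.filter_cons, h, Bool.false_eq_true, if_false]

-- the pvDash fold over a body starting from an inserted section value
theorem pv_dashfold_insert (body : List String) (d : PySem.Dict String (List String))
    (c : String) (v : List String) :
    body.foldl (pvDash c) (d.insert c v) = d.insert c (v ++ pvKpisA c body) := by
  by_cases hc : c = ""
  · subst hc
    have hskip : ∀ (e : PySem.Dict String (List String)) (l : String), pvDash "" e l = e := by
      intro e l; simp [pvDash]
    have : ∀ (b : List String) (e : PySem.Dict String (List String)), b.foldl (pvDash "") e = e := by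
      intro b; induction b with
      | nil => intro e; rfl
      | cons x t ih => intro e; rw [List.foldl_cons, hskip]; exact ih e
    rw [this]
    simp [pvKpisA]
  · induction body generalizing v with
    | nil => simp [pvKpisA, hc, pvKpis]
    | cons l b ih =>
      rw [List.foldl_cons]
      by_cases hdash : PySem.Str.startswith l "-" = true
      · have hstep : pvDash c (d.insert c v) l
            = d.insert c (v ++ [PySem.Str.strip (PySem.Str.slice l (some 1) none)]) := by
          unfold pvDash
          rw [if_pos (by rw [hdash]; simp [hc])]
          exact pv_modify_insert d c v [] _
        rw [hstep, ih]
        unfold pvKpisA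
        rw [if_neg hc, if_neg hc, pv_kpis_cons_pos l b hdash, List.append_assoc,
          List.singleton_append]
      · rw [Bool.not_eq_true] at hdash
        have hstep : pvDash c (d.insert c v) l = d.insert c v := by
          unfold pvDash
          rw [if_neg (by rw [hdash]; simp)]
        rw [hstep, ih]
        unfold pvKpisA
        rw [if_neg hc, if_neg hc, pv_kpis_cons_neg l b hdash]

theorem pv_head_dropWhile (p : String → Bool) (l : List String) (x : String)
    (h : (l.dropWhile p).head? = some x) : p x = false := by
  induction l with
  | nil => simp at h
  | cons a t ih =>
    rw [List.dropWhile_cons] at h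
    split at h
    · exact ih h
    · simp_all

-- A on a line list whose head (if any) is a header equals B's per-group inserts, with A's kpis
theorem pv_Ncore (ls : List String) :
    (∀ x ∈ ls.head?, pvIsH x = true) → ∀ (cur : Option String) (d : PySem.Dict String (List String)),
      (ls.foldl pvLineStepA (d, cur)).1 = (pvGroups ls).foldl pvInsA d := by
  induction ls using pvGroups.induct with
  | case1 => intro _ cur d; simp [pvGroups]
  | case2 l rest hH ih =>
    intro _ cur d
    rw [List.foldl_cons, pv_stepA_header _ _ _ hH, pv_foldl_stepA_body, pv_dashfold_insert,
      List.nil_append]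
    have hrec := ih (fun x hx => by
        have := pv_head_dropWhile _ _ _ hx
        simpa using this)
      (some (pvBpName l)) (d.insert (pvBpName l) (pvKpisA (pvBpName l) (rest.takeWhile (fun x => !pvIsH x))))
    rw [hrec]
    simp [pvGroups, hH, pvInsA]
  | case3 l rest hH ih =>
    intro hf
    exact absurd (hf l rfl) hH

-- A's fold from the initial state, characterised group-wise
theorem pv_Achar (ls : List String) (d : PySem.Dict String (List String)) :
    (ls.foldl pvLineStepA (d, none)).1 = (pvGroups ls).foldl pvInsA d := by
  induction ls generalizing d with
  | nil => simp [pvGroups]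
  | cons l rest ih =>
    by_cases hH : pvIsH l = true
    · exact pv_Ncore (l :: rest) (by intro x hx; simp at hx; rwa [hx] at hH) none d
    · rw [Bool.not_eq_true] at hH
      rw [List.foldl_cons, pv_stepA_none _ _ hH]
      simp only [pvGroups, hH, Bool.false_eq_true, if_false]
      exact ih d

theorem pv_A_eq (text : String) :
    parse_best_practices_and_kpis text
      = ((pvGroups (((PySem.Str.split? text "\n").getD []).map PySem.Str.strip)).foldl
          pvInsA PySem.Dict.empty).items := by
  unfold parse_best_practices_and_kpis
  have hmap : ∀ (raws : List String) (init : PySem.Dict String (List String) × Option String),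
      raws.foldl pvStepA init = (raws.map PySem.Str.strip).foldl pvLineStepA init := by
    intro raws init
    rw [List.foldl_map]
    rfl
  rw [hmap, pv_Achar]

theorem pv_B_eq (text : String) :
    parse_best_practices_and_kpis_alt text
      = ((pvGroups (((PySem.Str.split? text "\n").getD []).map PySem.Str.strip)).foldl
          pvInsB PySem.Dict.empty).items := rfl

-- inserting key "" into two dicts that agree everywhere except (possibly) at "" gives equal dicts
theorem pv_insert_empty_eq (d1 d2 : PySem.Dict String (List String))
    (hk : d1.keys = d2.keys) (hnd : d1.keys.Nodup)
    (hg : ∀ k, k ≠ "" → d1.get? k = d2.get? k) (x : List String) :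
    d1.insert "" x = d2.insert "" x := by
  apply PySem.Dict.ext
  have hnd2 : d2.keys.Nodup := hk ▸ hnd
  have hc : d1.contains "" = d2.contains "" := by
    rw [PySem.Dict.contains_eq_decide_mem_keys, PySem.Dict.contains_eq_decide_mem_keys, hk]
  have hkins : (d1.insert "" x).keys = (d2.insert "" x).keys := by
    by_cases hcon : d1.contains "" = true
    · rw [PySem.Dict.keys_insert_of_contains _ _ hcon,
        PySem.Dict.keys_insert_of_contains _ _ (hc ▸ hcon), hk]
    · rw [Bool.not_eq_true] at hcon
      rw [PySem.Dict.keys_insert_of_not_contains _ _ hcon,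
        PySem.Dict.keys_insert_of_not_contains _ _ (hc ▸ hcon), hk]
  rw [PySem.Dict.items_eq_map_keys _ (PySem.Dict.nodup_keys_insert _ _ _ hnd) [],
    PySem.Dict.items_eq_map_keys _ (PySem.Dict.nodup_keys_insert _ _ _ hnd2) [], hkins]
  apply List.map_congr_left
  intro k _
  by_cases hke : k = ""
  · subst hke
    rw [PySem.Dict.getD_insert, PySem.Dict.getD_insert, if_pos rfl, if_pos rfl]
  · rw [PySem.Dict.getD_insert, PySem.Dict.getD_insert, if_neg hke, if_neg hke,
      PySem.Dict.getD_eq_get?_getD, PySem.Dict.getD_eq_get?_getD, hg k hke]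

-- keys of two same-key inserts agree
theorem pv_keys_insert_eq (d1 d2 : PySem.Dict String (List String))
    (hk : d1.keys = d2.keys) (n : String) (v w : List String) :
    (d1.insert n v).keys = (d2.insert n w).keys := by
  have hc : d1.contains n = d2.contains n := by
    rw [PySem.Dict.contains_eq_decide_mem_keys, PySem.Dict.contains_eq_decide_mem_keys, hk]
  by_cases hcon : d1.contains n = true
  · rw [PySem.Dict.keys_insert_of_contains _ _ hcon,
      PySem.Dict.keys_insert_of_contains _ _ (hc ▸ hcon), hk]
  · rw [Bool.not_eq_true] at hcon
    rw [PySem.Dict.keys_insert_of_not_contains _ _ hcon,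
      PySem.Dict.keys_insert_of_not_contains _ _ (hc ▸ hcon), hk]

-- if no group is named "", pvGBad is false
theorem pv_gbad_of_no_empty (gs : List (String × List String))
    (h : gs.any (fun g => pvBpName g.1 == "") = false) : pvGBad gs = false := by
  induction gs with
  | nil => rfl
  | cons g t ih =>
    rw [List.any_cons, Bool.or_eq_false_iff] at h
    unfold pvGBad
    rw [if_neg (by rw [h.2]; exact Bool.false_ne_true), h.1]
    rfl

-- the two folds agree when the last empty-named group (if any) has no kpis
theorem pv_foldl_AB_eq (gs : List (String × List String)) :
    ∀ (d1 d2 : PySem.Dict String (List String)),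
      d1.keys = d2.keys → d1.keys.Nodup →
      (∀ k, k ≠ "" → d1.get? k = d2.get? k) →
      (gs.any (fun g => pvBpName g.1 == "") = false → d1 = d2) →
      pvGBad gs = false →
      gs.foldl pvInsA d1 = gs.foldl pvInsB d2 := by
  induction gs with
  | nil =>
    intro d1 d2 _ _ _ heq _
    exact heq rfl
  | cons g t ih =>
    intro d1 d2 hk hnd hg heq hbad
    rw [List.foldl_cons, List.foldl_cons]
    by_cases hn : pvBpName g.1 = ""
    · by_cases ha : t.any (fun g => pvBpName g.1 == "") = true
      · -- another ""-group follows: values at "" may diverge for now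
        have hbad' : pvGBad t = false := by
          unfold pvGBad at hbad
          rwa [if_pos ha] at hbad
        apply ih
        · unfold pvInsA pvInsB
          rw [hn]
          exact pv_keys_insert_eq d1 d2 hk "" _ _
        · unfold pvInsA
          exact PySem.Dict.nodup_keys_insert _ _ _ hnd
        · intro k hke
          unfold pvInsA pvInsB
          rw [hn, PySem.Dict.get?_insert_of_ne _ _ hke, PySem.Dict.get?_insert_of_ne _ _ hke]
          exact hg k hke
        · intro hfalse
          rw [hfalse] at ha
          exact absurd ha Bool.false_ne_true
        · exact hbad'
      · -- g is the last ""-group: pvGBad forces its kpis empty, both sides insert ("", [])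
        rw [Bool.not_eq_true] at ha
        have hke : (pvKpis g.2).isEmpty = true := by
          unfold pvGBad at hbad
          rw [if_neg (by rw [ha]; exact Bool.false_ne_true)] at hbad
          rw [Bool.and_eq_false_iff] at hbad
          rcases hbad with h | h
          · exact absurd h (by simp [hn])
          · simpa using h
        have hkenil : pvKpis g.2 = [] := by simpa [List.isEmpty_iff] using hke
        have hstep : d1.insert (pvBpName g.1) (pvKpisA (pvBpName g.1) g.2)
            = d2.insert (pvBpName g.1) (pvKpis g.2) := by
          rw [hn, hkenil]
          unfold pvKpisA
          rw [if_pos rfl]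
          exact pv_insert_empty_eq d1 d2 hk hnd hg []
        unfold pvInsA pvInsB
        rw [hstep]
        apply ih
        · rfl
        · rw [← hstep]
          exact PySem.Dict.nodup_keys_insert _ _ _ hnd
        · intro _ _; rfl
        · intro _; rfl
        · exact pv_gbad_of_no_empty t ha
    · -- named group: both sides do the identical insert
      have hv : pvKpisA (pvBpName g.1) g.2 = pvKpis g.2 := by
        unfold pvKpisA
        rw [if_neg hn]
      apply ih
      · unfold pvInsA pvInsB
        rw [hv]
        exact pv_keys_insert_eq d1 d2 hk _ _ _
      · unfold pvInsA
        exact PySem.Dict.nodup_keys_insert _ _ _ hnd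
      · intro k hke
        unfold pvInsA pvInsB
        rw [hv, PySem.Dict.get?_insert, PySem.Dict.get?_insert]
        by_cases hkn : k = pvBpName g.1
        · rw [if_pos hkn, if_pos hkn]
        · rw [if_neg hkn, if_neg hkn]
          exact hg k hke
      · intro hfalse
        have : (g :: t).any (fun g => pvBpName g.1 == "") = false := by
          rw [List.any_cons, hfalse, Bool.or_false]
          simp [hn]
        have hd12 := heq this
        unfold pvInsA pvInsB
        rw [hv, hd12]
      · unfold pvGBad at hbad
        by_cases ha : t.any (fun g => pvBpName g.1 == "") = true
        · rwa [if_pos ha] at hbad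
        · rw [Bool.not_eq_true] at ha
          exact pv_gbad_of_no_empty t ha

-- get? "" is untouched by inserts at non-empty names
theorem pv_get_empty_foldl (v : (String × List String) → List String) (gs : List (String × List String)) :
    ∀ (d : PySem.Dict String (List String)),
      gs.all (fun g => !(pvBpName g.1 == "")) = true →
      (gs.foldl (fun d g => d.insert (pvBpName g.1) (v g)) d).get? "" = d.get? "" := by
  induction gs with
  | nil => intro d _; rfl
  | cons g t ih =>
    intro d h
    rw [List.all_cons, Bool.and_eq_true] at h
    rw [List.foldl_cons, ih _ h.2, PySem.Dict.get?_insert_of_ne _ _ (by simpa using h.1)]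

-- when pvGBad holds, the two folds end with different values at key ""
theorem pv_foldl_AB_ne (gs : List (String × List String)) :
    ∀ (d1 d2 : PySem.Dict String (List String)), pvGBad gs = true →
      ∃ w, w ≠ [] ∧ (gs.foldl pvInsA d1).get? "" = some []
        ∧ (gs.foldl pvInsB d2).get? "" = some w := by
  induction gs with
  | nil => intro _ _ h; exact absurd h (by simp [pvGBad])
  | cons g t ih =>
    intro d1 d2 hbad
    rw [List.foldl_cons, List.foldl_cons]
    by_cases ha : t.any (fun g => pvBpName g.1 == "") = true
    · have hbad' : pvGBad t = true := by
        unfold pvGBad at hbad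
        rwa [if_pos ha] at hbad
      exact ih _ _ hbad'
    · rw [Bool.not_eq_true] at ha
      unfold pvGBad at hbad
      rw [if_neg (by rw [ha]; exact Bool.false_ne_true), Bool.and_eq_true] at hbad
      have hn : pvBpName g.1 = "" := by simpa using hbad.1
      have hne : pvKpis g.2 ≠ [] := by
        have := hbad.2
        simpa [List.isEmpty_iff] using this
      have hall : t.all (fun g => !(pvBpName g.1 == "")) = true := by
        rw [List.all_eq_true]
        intro g' hg'
        rw [List.any_eq_false] at ha
        simpa using ha g' hg' 
      refine ⟨pvKpis g.2, hne, ?_, ?_⟩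
      · unfold pvInsA
        rw [pv_get_empty_foldl _ t _ hall, hn]
        unfold pvKpisA
        rw [if_pos rfl, PySem.Dict.get?_insert_self]
      · unfold pvInsB
        rw [pv_get_empty_foldl _ t _ hall, hn, PySem.Dict.get?_insert_self]


theorem pv_isEH_false (x : String) (h : pvIsH x = false) : pvIsEH x = false := by
  unfold pvIsEH
  rw [h]
  rfl

theorem pv_kpis_any (b : List String) :
    (!(pvKpis b).isEmpty) = b.any (fun x => PySem.Str.startswith x "-") := by
  induction b with
  | nil => rfl
  | cons x t ih =>
    by_cases hx : PySem.Str.startswith x "-" = true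
    · rw [pv_kpis_cons_pos x t hx, List.any_cons, hx, Bool.true_or]
      rfl
    · rw [Bool.not_eq_true] at hx
      rw [pv_kpis_cons_neg x t hx, List.any_cons, hx, Bool.false_or, ih]

theorem pv_tails_any_append (b r : List String) (hb : ∀ x ∈ b, pvIsH x = false) :
    ((b ++ r).tails.any pvTailBadP) = r.tails.any pvTailBadP := by
  induction b with
  | nil => rfl
  | cons x t ih =>
    rw [List.cons_append, List.tails_cons, List.any_cons,
      ih (fun y hy => hb y (List.mem_cons_of_mem _ hy))]
    have hx : pvTailBadP (x :: (t ++ r)) = false := by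
      simp only [pvTailBadP]
      rw [pv_isEH_false x (hb x List.mem_cons_self)]
      rfl
    rw [hx, Bool.false_or]

theorem pv_tails_any_false (r : List String) (h : r.any pvIsEH = false) :
    r.tails.any pvTailBadP = false := by
  induction r with
  | nil => rfl
  | cons x t ih =>
    rw [List.any_cons, Bool.or_eq_false_iff] at h
    rw [List.tails_cons, List.any_cons, ih h.2]
    have hx : pvTailBadP (x :: t) = false := by
      simp only [pvTailBadP]
      rw [h.1]
      rfl
    rw [hx, Bool.false_or]

theorem pv_groups_any_empty (ls : List String) :
    (pvGroups ls).any (fun g => pvBpName g.1 == "") = ls.any pvIsEH := by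
  induction ls using pvGroups.induct with
  | case1 => simp [pvGroups]
  | case2 l rest hH ih =>
    have hgroups : pvGroups (l :: rest)
        = (l, rest.takeWhile (fun x => !pvIsH x)) :: pvGroups (rest.dropWhile (fun x => !pvIsH x)) := by
      simp [pvGroups, hH]
    rw [hgroups, List.any_cons, List.any_cons, ih]
    have hsplit : rest.any pvIsEH = (rest.dropWhile (fun x => !pvIsH x)).any pvIsEH := by
      conv_lhs => rw [← List.takeWhile_append_dropWhile (p := fun x => !pvIsH x) (l := rest)]
      rw [List.any_append]
      have hbody : (rest.takeWhile (fun x => !pvIsH x)).any pvIsEH = false := by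
        rw [List.any_eq_false]
        intro x hx
        have := List.mem_takeWhile_imp hx
        rw [pv_isEH_false x (by simpa using this)]
        exact Bool.false_ne_true
      rw [hbody, Bool.false_or]
    have hEH : pvIsEH l = (pvBpName l == "") := by
      unfold pvIsEH
      rw [hH]
      exact Bool.true_and _
    rw [hsplit, hEH]
  | case3 l rest hH ih =>
    rw [Bool.not_eq_true] at hH
    have hgroups : pvGroups (l :: rest) = pvGroups rest := by simp [pvGroups, hH]
    rw [hgroups, ih, List.any_cons, pv_isEH_false l hH, Bool.false_or]

theorem pv_gbad_bridge (ls : List String) :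
    pvGBad (pvGroups ls) = ls.tails.any pvTailBadP := by
  induction ls using pvGroups.induct with
  | case1 => simp [pvGroups, pvGBad, pvTailBadP]
  | case2 l rest hH ih =>
    have hgroups : pvGroups (l :: rest)
        = (l, rest.takeWhile (fun x => !pvIsH x)) :: pvGroups (rest.dropWhile (fun x => !pvIsH x)) := by
      simp [pvGroups, hH]
    have hbody : ∀ x ∈ rest.takeWhile (fun x => !pvIsH x), pvIsH x = false := by
      intro x hx
      have := List.mem_takeWhile_imp hx
      simpa using this
    have hrest : rest = rest.takeWhile (fun x => !pvIsH x) ++ rest.dropWhile (fun x => !pvIsH x) :=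
      (List.takeWhile_append_dropWhile).symm
    have h2 : rest.tails.any pvTailBadP
        = (rest.dropWhile (fun x => !pvIsH x)).tails.any pvTailBadP := by
      conv_lhs => rw [hrest]
      exact pv_tails_any_append _ _ hbody
    rw [hgroups, List.tails_cons, List.any_cons, h2]
    show (if (pvGroups (rest.dropWhile (fun x => !pvIsH x))).any (fun h => pvBpName h.1 == "") = true
        then pvGBad (pvGroups (rest.dropWhile (fun x => !pvIsH x)))
        else (pvBpName l == "") && !(pvKpis (rest.takeWhile (fun x => !pvIsH x))).isEmpty) = _
    rw [pv_groups_any_empty]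
    by_cases hA : (rest.dropWhile (fun x => !pvIsH x)).any pvIsEH = true
    · rw [if_pos hA, ih]
      have hTB : pvTailBadP (l :: rest) = false := by
        simp only [pvTailBadP]
        have hallf : rest.all (fun x => !pvIsEH x) = false := by
          rw [hrest, List.all_append, Bool.and_eq_false_iff]
          right
          obtain ⟨x, hx, hEHx⟩ := List.any_eq_true.mp hA
          exact List.all_eq_false.mpr ⟨x, hx, by simp [hEHx]⟩
        rw [hallf, Bool.and_false, Bool.false_and]
      rw [hTB, Bool.false_or]
    · rw [Bool.not_eq_true] at hA
      rw [if_neg (by rw [hA]; exact Bool.false_ne_true), pv_tails_any_false _ hA, Bool.or_false]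
      simp only [pvTailBadP]
      have hEH : pvIsEH l = (pvBpName l == "") := by
        unfold pvIsEH
        rw [hH]
        exact Bool.true_and _
      have hall : rest.all (fun x => !pvIsEH x) = true := by
        rw [hrest, List.all_append, Bool.and_eq_true]
        constructor
        · rw [List.all_eq_true]
          intro x hx
          rw [pv_isEH_false x (hbody x hx)]
          rfl
        · rw [List.all_eq_true]
          intro x hx
          rw [List.any_eq_false] at hA
          simpa using hA x hx
      rw [hEH, hall, Bool.and_true, pv_kpis_any]
  | case3 l rest hH ih =>
    rw [Bool.not_eq_true] at hH
    have hgroups : pvGroups (l :: rest) = pvGroups rest := by simp [pvGroups, hH]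
    rw [hgroups, ih, List.tails_cons, List.any_cons]
    have hx : pvTailBadP (l :: rest) = false := by
      simp only [pvTailBadP]
      rw [pv_isEH_false l hH]
      rfl
    rw [hx, Bool.false_or]

-- ===== VERDICT (by name: the statement is the Claim_ definition above) =====
theorem parse_best_practices_and_kpis_spec : Claim_unchanged_parse_best_practices_and_kpis := by
  intro text _ _ hnD
  have hbadf : pvGBad (pvGroups (((PySem.Str.split? text "\n").getD []).map PySem.Str.strip))
      = false := by
    rw [pv_gbad_bridge]
    rw [pv_D_iff] at hnD
    cases hb : (((PySem.Str.split? text "\n").getD []).map PySem.Str.strip).tails.any pvTailBadP with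
    | false => rfl
    | true => exact absurd hb hnD
  have hmain := pv_foldl_AB_eq
    (pvGroups (((PySem.Str.split? text "\n").getD []).map PySem.Str.strip))
    PySem.Dict.empty PySem.Dict.empty rfl PySem.Dict.nodup_keys_empty
    (fun _ _ => rfl) (fun _ => rfl) hbadf
  rw [pv_A_eq, pv_B_eq, hmain]

theorem parse_best_practices_and_kpis_changed : Claim_changed_parse_best_practices_and_kpis := by
  unfold Claim_changed_parse_best_practices_and_kpis
  refine ⟨by decide, by decide, by decide, by decide, ?_, by decide⟩
  have hl : (((PySem.Str.split? pvDiffWitness_parse_best_practices_and_kpis "\n").getD []).map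
      PySem.Str.strip) = ["BP1:", "- x"] := by decide
  have t1 : pvIsH "BP1:" = true := by decide
  have t2 : List.takeWhile (fun x => !pvIsH x) ["- x"] = ["- x"] := by decide
  have t3 : List.dropWhile (fun x => !pvIsH x) ["- x"] = [] := by decide
  have hg : pvGroups ["BP1:", "- x"] = [("BP1:", ["- x"])] := by
    simp [pvGroups, t1, t2, t3]
  rw [pv_B_eq, hl, hg]
  decide

theorem parse_best_practices_and_kpis_tight : Claim_exact_parse_best_practices_and_kpis := by
  intro text _ _ hD heq
  rw [pv_D_iff] at hD
  rw [pv_A_eq, pv_B_eq] at heq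
  have hbad : pvGBad (pvGroups (((PySem.Str.split? text "\n").getD []).map PySem.Str.strip)) = true := by
    rw [pv_gbad_bridge]
    exact hD
  obtain ⟨w, hw, h1, h2⟩ := pv_foldl_AB_ne _ PySem.Dict.empty PySem.Dict.empty hbad
  have : (some [] : Option (List String)) = some w := by
    rw [← h1, ← h2, PySem.Dict.ext heq]
  exact hw (Option.some.injEq _ _ ▸ this.symm)
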